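-- pv_equiv track=rewrite | github.com/baaagr/Classification_of_algebraic_tangles | partition.py | replace_0_with_negative
-- ===== SOURCE A (Python) =====
-- from itertools import product
--
-- def replace_0_with_negative(string, n):
--     if '0' in string:
--         #crossnum = sum([abs(int(num)) for num in string.replace(')',' ').replace('(',' ').split()])
--         splitted = string.split(' 0')
--         nest_levels = []
--         for part in splitted[1:]:
--             nest_level = 0
--             for x in part:
--                 if x == ')':
--                     nest_level += 1
--                 elif x == ' ':
--                     continue
--                 else:
--                     break
--             nest_levels.append(nest_level)
--         to_insert = []
--         for k in nest_levels:
--             to_insert.append([-x for x in range(k+2)])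
--         new_tangles = []
--         for prod in product(*to_insert):
--             new_tangle = ''
--             for s,p in zip(splitted[:-1],prod):
--                 new_tangle += '{} {:d}'.format(s, p)
--             new_tangle += splitted[-1]
--             new_tangles.append(new_tangle)
--         return new_tangles
--     return [string]
-- ===== SOURCE B (Python) =====
-- def _nest(part):
--     i = 0
--     while i < len(part) and part[i] in ') ':
--         i += 1
--     return part.count(')', 0, i)
--
-- def replace_0_with_negative(string, n):
--     if '0' not in string:
--         return [string]
--     parts = string.split(' 0')
--     results = [parts[-1]]
--     # build the combinations back to front: the rightmost slot varies fastest
--     for j in range(len(parts) - 2, -1, -1):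
--         k = _nest(parts[j + 1])
--         results = ['%s %d%s' % (parts[j], p, r)
--                    for p in range(0, -(k + 2), -1) for r in results]
--     return results
-- ===== Notes on version B (the rewrite author's own statement) =====
-- stated objective: alternative
-- what changed: Replaces the itertools.product enumeration plus per-tuple left-to-right assembly with a single back-to-front fold that extends the already-built tangle suffixes slot by slot (rightmost slot varying fastest), and computes each nest level by counting ')' in the take-while prefix instead of a char-by-char break loop.
import Mathlib
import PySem

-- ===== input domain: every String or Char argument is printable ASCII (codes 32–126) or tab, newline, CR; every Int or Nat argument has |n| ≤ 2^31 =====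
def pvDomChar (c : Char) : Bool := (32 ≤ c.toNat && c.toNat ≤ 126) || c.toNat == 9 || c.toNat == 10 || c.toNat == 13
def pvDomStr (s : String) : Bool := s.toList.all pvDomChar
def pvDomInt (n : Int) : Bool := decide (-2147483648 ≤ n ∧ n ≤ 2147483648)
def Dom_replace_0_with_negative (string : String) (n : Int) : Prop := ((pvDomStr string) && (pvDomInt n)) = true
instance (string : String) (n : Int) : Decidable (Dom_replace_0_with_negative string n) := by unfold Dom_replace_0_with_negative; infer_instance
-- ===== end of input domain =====

-- B replaces itertools.product with a back-to-front fold that extends partial tangles slot by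
-- slot (rightmost slot varying fastest, matching product's order): objective 'alternative'.
-- Both programs ignore n and are total; strings are handled as List Char per the PySem convention.

-- ===== PORT A =====

-- A's inner scan: count ')' (skipping ' ') until the first other character
def nestA : List Char → Nat
  | [] => 0
  | c :: rest => if c = ')' then nestA rest + 1 else if c = ' ' then nestA rest else 0

-- [-x for x in range(k+2)]
def optsA (k : Nat) : List Int := (PySem.List.pyRange 0 ((k : Int) + 2) 1).map (fun x => -x)

-- itertools.product(*to_insert), ported as the standard accumulator fold (same order)
def prodGo (acc : List (List Int)) : List (List Int) → List (List Int)
  | [] => acc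
  | opts :: rest => prodGo (acc.flatMap (fun t => opts.map (fun p => t ++ [p]))) rest

-- the inner 'for s,p in zip(...): new_tangle += "{} {:d}".format(s, p)' loop
def assembleGo (acc : List Char) : List (List Char × Int) → List Char
  | [] => acc
  | (s, p) :: rest => assembleGo (acc ++ s ++ ' ' :: PySem.Int.toChars p) rest

def replace_0_with_negative (string : String) (n : Int) : List String :=
  if PySem.Chars.isIn ['0'] string.toList then
    let splitted := PySem.Chars.splitOn string.toList [' ', '0']
    let nest_levels := (splitted.drop 1).map nestA
    let to_insert := nest_levels.map optsA
    -- splitted[-1]: split never returns [], so getLastD is exact here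
    let tangles := (prodGo [[]] to_insert).map (fun pr =>
      assembleGo [] (splitted.dropLast.zip pr) ++ splitted.getLastD [])
    tangles.map String.ofList
  else [string]

-- ===== PORT B =====

-- Source B's _nest: count ')' in the maximal prefix of characters from ') '
def nestB (part : List Char) : Nat :=
  (part.takeWhile (fun c => c == ')' || c == ' ')).count ')'

def replace_0_with_negative_alt (string : String) (n : Int) : List String :=
  if PySem.Chars.isIn ['0'] string.toList then
    let parts := PySem.Chars.splitOn string.toList [' ', '0']
    -- 'for j in range(len(parts)-2, -1, -1)' pairing parts[j] with parts[j+1]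
    let results := ((parts.dropLast.zip (parts.drop 1)).reverse).foldl
      (fun results sp =>
        let k := nestB sp.2
        (PySem.List.pyRange 0 (-((k : Int) + 2)) (-1)).flatMap
          (fun p => results.map (fun r => sp.1 ++ ' ' :: PySem.Int.toChars p ++ r)))
      [parts.getLastD []]
    results.map String.ofList
  else [string]

-- ===== PRECONDITION & SPEC =====
def Spec_replace_0_with_negative (string : String) (n : Int) (out : List String) : Prop := out = replace_0_with_negative_alt string n
instance (string : String) (n : Int) (out : List String) : Decidable (Spec_replace_0_with_negative string n out) := by unfold Spec_replace_0_with_negative; infer_instance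

-- ===== CLAIM (what is proved, stated in full; the proofs are below) =====
def Claim_equal_replace_0_with_negative : Prop := ∀ (string : String) (n : Int), Dom_replace_0_with_negative string n → Spec_replace_0_with_negative string n (replace_0_with_negative string n)

-- ===== LEMMAS AND PROOFS =====

theorem nestA_eq_nestB (part : List Char) : nestA part = nestB part := by
  induction part with
  | nil => rfl
  | cons c rest ih =>
    by_cases h1 : c = ')'
    · simp [nestA, nestB, h1] at *
      omega
    · by_cases h2 : c = ' '
      · simp [nestA, nestB, h2] at *
        omega
      · simp [nestA, nestB, h1, h2]

theorem optsA_eq (k : Nat) :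
    optsA k = PySem.List.pyRange 0 (-((k : Int) + 2)) (-1) := by
  unfold optsA
  rw [PySem.List.pyRange_neg_one, PySem.List.pyRange_of_pos 0 ((k : Int) + 2) (by omega)]
  rw [if_pos (by omega : (0:Int) < (k : Int) + 2)]
  have h1 : (((k : Int) + 2 - 0 + 1 - 1) / 1).toNat = ((0:Int) - -((k : Int) + 2)).toNat := by omega
  rw [h1]
  simp [List.map_map, Function.comp_def]

theorem prodGo_acc (os : List (List Int)) (acc : List (List Int)) :
    prodGo acc os = acc.flatMap (fun t => (prodGo [[]] os).map (t ++ ·)) := by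
  induction os generalizing acc with
  | nil => simp [prodGo]
  | cons opts rest ih =>
    show prodGo (acc.flatMap _) rest = _
    rw [ih]
    conv_rhs => rw [show prodGo [[]] (opts :: rest) = prodGo ([[]].flatMap (fun t => opts.map (fun p => t ++ [p]))) rest from rfl, ih]
    simp [List.flatMap_assoc, List.flatMap_map, List.map_flatMap, List.map_map,
      Function.comp_def, List.append_assoc]

theorem assembleGo_acc (ps : List (List Char × Int)) (acc : List Char) :
    assembleGo acc ps = acc ++ assembleGo [] ps := by
  induction ps generalizing acc with
  | nil => simp [assembleGo]
  | cons sp rest ih =>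
    obtain ⟨s, p⟩ := sp
    show assembleGo (acc ++ s ++ ' ' :: PySem.Int.toChars p) rest = _
    rw [ih, show assembleGo ([] : List Char) ((s, p) :: rest)
          = assembleGo ([] ++ s ++ ' ' :: PySem.Int.toChars p) rest from rfl, ih]
    simp
    rw [ih (s ++ ' ' :: PySem.Int.toChars p)]
    simp

theorem key_lemma (L : List (List Char × List Int)) (tail : List Char) :
    (prodGo [[]] (L.map Prod.snd)).map
        (fun pr => assembleGo [] ((L.map Prod.fst).zip pr) ++ tail)
      = L.foldr (fun sp results =>
          sp.2.flatMap (fun p => results.map (fun r => sp.1 ++ ' ' :: PySem.Int.toChars p ++ r)))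
        [tail] := by
  induction L with
  | nil => simp [prodGo, assembleGo]
  | cons sp L ih =>
    obtain ⟨s, opts⟩ := sp
    rw [List.foldr_cons, ← ih]
    show (prodGo [[]] (opts :: L.map Prod.snd)).map _ = _
    rw [show prodGo [[]] (opts :: L.map Prod.snd)
          = prodGo ([[]].flatMap (fun t => opts.map (fun p => t ++ [p]))) (L.map Prod.snd) from rfl,
        prodGo_acc]
    simp only [List.flatMap_cons, List.flatMap_nil, List.nil_append, List.append_nil,
      List.map_flatMap, List.map_map, List.flatMap_map, Function.comp_def]
    apply List.flatMap_congr
    intro p _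
    apply List.map_congr_left
    intro q _
    show assembleGo [] (((s, p) :: (L.map Prod.fst).zip q)) ++ tail = _
    rw [show assembleGo [] ((s, p) :: (L.map Prod.fst).zip q)
          = assembleGo ([] ++ s ++ ' ' :: PySem.Int.toChars p) ((L.map Prod.fst).zip q) from rfl,
        assembleGo_acc]
    simp [List.append_assoc]

-- ===== VERDICT (by name: the statement is the Claim_ definition above) =====
theorem replace_0_with_negative_spec : Claim_equal_replace_0_with_negative := by
  intro string n _
  unfold Spec_replace_0_with_negative replace_0_with_negative replace_0_with_negative_alt
  by_cases h : PySem.Chars.isIn ['0'] string.toList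
  · simp only [h, if_pos]
    set splitted := PySem.Chars.splitOn string.toList [' ', '0'] with hs
    congr 1
    rw [List.foldl_reverse]
    simp only [← nestA_eq_nestB, ← optsA_eq]
    have hlen : splitted.dropLast.length = (splitted.drop 1).length := by
      simp [List.length_dropLast]
    have hL := key_lemma
      ((splitted.dropLast.zip (splitted.drop 1)).map
        (fun sp => (sp.1, optsA (nestA sp.2))))
      (splitted.getLastD [])
    rw [List.foldr_map] at hL
    simp only [List.map_map, Function.comp_def] at hL
    rw [List.map_fst_zip (le_of_eq hlen)] at hL
    rw [show ((splitted.dropLast.zip (splitted.drop 1)).map (fun sp => optsA (nestA sp.2)))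
          = (splitted.drop 1).map (fun p => optsA (nestA p)) from by
            conv_rhs => rw [← List.map_snd_zip (le_of_eq hlen.symm)]
            simp [List.map_map, Function.comp_def]] at hL
    rw [show ((splitted.drop 1).map nestA).map optsA
          = (splitted.drop 1).map (fun p => optsA (nestA p)) from by
            simp [List.map_map, Function.comp_def]]
    exact hL
  · simp [h]
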